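-- pv_equiv track=rewrite | github.com/MilenOrfeev/aoc | task3_1.py | closest_intersection
-- ===== SOURCE A (Python) =====
-- def next_location(direction, current):
--     if direction == 'R':
--         return current[0], current[1] + 1
--     elif direction == 'D':
--         return current[0] - 1, current[1]
--     elif direction == 'L':
--         return current[0], current[1] - 1
--     elif direction == 'U':
--         return current[0] + 1, current[1]
--     else:
--         raise ValueError("Invalid Input")
--
-- def closest_intersection(first_locations, second_moves):
--     centre = (0, 0)
--     current = centre
--     smallest_distance = -1
--
--     for move in second_moves:
--         direction = move[0]
--         repetitions = int(move[1:])
--         for count in range(0, repetitions):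
--             current = next_location(direction, current)
--             if current in first_locations:
--                 current_distance = manhattan_distance(current, centre)
--                 if current_distance < smallest_distance or smallest_distance == -1:
--                     smallest_distance = current_distance
--
--     return smallest_distance
--
-- def manhattan_distance(first, second):
--     return abs(first[0] - second[0]) + abs(first[1] - second[1])
-- ===== SOURCE B (Python) =====
-- DELTAS = {'R': (0, 1), 'D': (-1, 0), 'L': (0, -1), 'U': (1, 0)}
--
--
-- def wire_segments(moves):
--     """Compress the wire into straight segments (start_x, start_y, dx, dy, length)."""
--     x, y = 0, 0
--     segments = []
--     for move in moves:
--         reps = int(move[1:])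
--         if reps > 0:
--             dx, dy = DELTAS[move[0]]
--             segments.append((x, y, dx, dy, reps))
--             x, y = x + dx * reps, y + dy * reps
--     return segments
--
--
-- def on_segment(point, segment):
--     px, py = point
--     sx, sy, dx, dy, reps = segment
--     if dx == 0:
--         return px == sx and 1 <= (py - sy) * dy <= reps
--     return py == sy and 1 <= (px - sx) * dx <= reps
--
--
-- def closest_intersection(first_locations, second_moves):
--     segments = wire_segments(second_moves)
--     best = -1
--     for point in first_locations:
--         if any(on_segment(point, s) for s in segments):
--             distance = abs(point[0]) + abs(point[1])
--             if distance < best or best == -1: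
--                 best = distance
--     return best
-- ===== Notes on version B (the rewrite author's own statement) =====
-- stated objective: faster
-- what changed: B never enumerates the wire point by point: it compresses the second wire into straight segments (start, unit delta, length) in one pass over the moves, then for each candidate point of first_locations tests interval containment on each segment arithmetically and keeps the running minimum distance, so the per-step inner loop disappears.
import Mathlib
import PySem

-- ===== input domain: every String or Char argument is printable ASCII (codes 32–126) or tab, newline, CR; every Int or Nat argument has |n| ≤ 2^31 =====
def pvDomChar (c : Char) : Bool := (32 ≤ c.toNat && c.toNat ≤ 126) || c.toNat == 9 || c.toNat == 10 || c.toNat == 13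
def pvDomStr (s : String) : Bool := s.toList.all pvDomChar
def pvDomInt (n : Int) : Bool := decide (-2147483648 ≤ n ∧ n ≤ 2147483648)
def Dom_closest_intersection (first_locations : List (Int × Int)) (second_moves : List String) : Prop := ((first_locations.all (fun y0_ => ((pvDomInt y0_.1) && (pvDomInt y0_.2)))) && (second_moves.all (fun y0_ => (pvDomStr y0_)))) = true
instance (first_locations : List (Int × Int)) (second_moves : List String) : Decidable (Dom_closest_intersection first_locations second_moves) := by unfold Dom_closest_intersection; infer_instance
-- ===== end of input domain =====

-- B compresses the second wire into straight segments and tests each first_locations point by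
-- interval arithmetic instead of enumerating the wire step by step; objective: faster.

-- ===== PORT A =====
-- Python's next_location raises ValueError on any other direction; Pre_ keeps such calls out,
-- so the fallback branch (returning `current`) is reached only on inputs outside the claim.
def nextLocation (direction : Char) (current : Int × Int) : Int × Int :=
  if direction = 'R' then (current.1, current.2 + 1)
  else if direction = 'D' then (current.1 - 1, current.2)
  else if direction = 'L' then (current.1, current.2 - 1)
  else if direction = 'U' then (current.1 + 1, current.2)
  else current

def manhattanDistance (first second : Int × Int) : Int :=
  |first.1 - second.1| + |first.2 - second.2|

def closest_intersection (first_locations : List (Int × Int)) (second_moves : List String) : Int :=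
  let centre : Int × Int := (0, 0)
  -- state = (current, smallest_distance); move[0] / int(move[1:]) fail only outside Pre_
  (second_moves.foldl (fun (st : (Int × Int) × Int) move =>
      let direction := move.toList.headD ' '
      let repetitions := (PySem.Int.ofChars? (move.toList.drop 1)).getD 0
      (PySem.List.pyRange 0 repetitions 1).foldl (fun (st : (Int × Int) × Int) _ =>
        let current := nextLocation direction st.1
        if first_locations.contains current then
          let current_distance := manhattanDistance current centre
          if current_distance < st.2 ∨ st.2 = -1 then (current, current_distance)
          else (current, st.2)
        else (current, st.2)) st)
    ((centre, (-1 : Int)))).2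

-- ===== PORT B =====
-- DELTAS[d]; the Python KeyError on an invalid direction is reached only outside Pre_
def deltaOf (d : Char) : Int × Int :=
  if d = 'R' then (0, 1)
  else if d = 'D' then (-1, 0)
  else if d = 'L' then (0, -1)
  else if d = 'U' then (1, 0)
  else (0, 0)

def wireSegments (moves : List String) : List (Int × Int × Int × Int × Int) :=
  -- state = ((x, y), segments)
  (moves.foldl (fun (st : (Int × Int) × List (Int × Int × Int × Int × Int)) move =>
      let reps := (PySem.Int.ofChars? (move.toList.drop 1)).getD 0
      if 0 < reps then
        let δ := deltaOf (move.toList.headD ' ')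
        ((st.1.1 + δ.1 * reps, st.1.2 + δ.2 * reps),
          st.2 ++ [(st.1.1, st.1.2, δ.1, δ.2, reps)])
      else st)
    (((0, 0) : Int × Int), ([] : List (Int × Int × Int × Int × Int)))).2

def onSegment (p : Int × Int) (s : Int × Int × Int × Int × Int) : Bool :=
  if s.2.2.1 = 0 then
    p.1 == s.1 && decide (1 ≤ (p.2 - s.2.1) * s.2.2.2.1) && decide ((p.2 - s.2.1) * s.2.2.2.1 ≤ s.2.2.2.2)
  else
    p.2 == s.2.1 && decide (1 ≤ (p.1 - s.1) * s.2.2.1) && decide ((p.1 - s.1) * s.2.2.1 ≤ s.2.2.2.2)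

def closest_intersection_alt (first_locations : List (Int × Int)) (second_moves : List String) : Int :=
  let segments := wireSegments second_moves
  first_locations.foldl (fun best p =>
    if segments.any (fun s => onSegment p s) then
      let distance := |p.1| + |p.2|
      if distance < best ∨ best = -1 then distance else best
    else best) (-1)

-- ===== PRECONDITION & SPEC =====
-- Pre_ = exactly the inputs on which Python A returns: every move is nonempty and its tail
-- parses as an int (else IndexError/ValueError), and whenever that int is positive the
-- direction letter is one of RDLU (else next_location raises ValueError on the first step).
def Pre_closest_intersection (first_locations : List (Int × Int)) (second_moves : List String) : Prop :=
  ∀ move ∈ second_moves, move.toList ≠ [] ∧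
    (PySem.Int.ofChars? (move.toList.drop 1)).isSome = true ∧
    ((PySem.Int.ofChars? (move.toList.drop 1)).getD 0 ≤ 0 ∨
      move.toList.headD ' ' ∈ ['R', 'D', 'L', 'U'])
instance (first_locations : List (Int × Int)) (second_moves : List String) : Decidable (Pre_closest_intersection first_locations second_moves) := by unfold Pre_closest_intersection; infer_instance

def pvWitness_closest_intersection : (List (Int × Int)) × List String :=
  ([((0 : Int), (1 : Int)), ((2 : Int), (2 : Int))], ["R2", "U1"])

def Spec_closest_intersection (first_locations : List (Int × Int)) (second_moves : List String) (out : Int) : Prop := out = closest_intersection_alt first_locations second_moves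
instance (first_locations : List (Int × Int)) (second_moves : List String) (out : Int) : Decidable (Spec_closest_intersection first_locations second_moves out) := by unfold Spec_closest_intersection; infer_instance

-- ===== CLAIM (what is proved, stated in full; the proofs are below) =====
def Claim_equal_closest_intersection : Prop := ∀ (first_locations : List (Int × Int)) (second_moves : List String), Dom_closest_intersection first_locations second_moves → Pre_closest_intersection first_locations second_moves → Spec_closest_intersection first_locations second_moves (closest_intersection first_locations second_moves)

-- ===== LEMMAS AND PROOFS =====

-- named copies of A's loop bodies (definitionally equal to the inline lambdas)
def stepA (fl : List (Int × Int)) (d : Char) (st : (Int × Int) × Int) (_ : Int) : (Int × Int) × Int :=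
  let current := nextLocation d st.1
  if fl.contains current then
    let cd := manhattanDistance current (0, 0)
    if cd < st.2 ∨ st.2 = -1 then (current, cd) else (current, st.2)
  else (current, st.2)

def dirOf (m : String) : Char := m.toList.headD ' '
def repsOf (m : String) : Int := (PySem.Int.ofChars? (m.toList.drop 1)).getD 0
def rangeOf (m : String) : List Int := PySem.List.pyRange 0 (repsOf m) 1

def outerStepA (fl : List (Int × Int)) (st : (Int × Int) × Int) (move : String) : (Int × Int) × Int :=
  (rangeOf move).foldl (stepA fl (dirOf move)) st

-- the points one move's walk visits, its end position, and the whole wire's trajectory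
def seg (d : Char) : Int × Int → List Int → List (Int × Int)
  | _, [] => []
  | c, _ :: t => nextLocation d c :: seg d (nextLocation d c) t

def walkEnd (d : Char) (c : Int × Int) (l : List Int) : Int × Int :=
  l.foldl (fun p _ => nextLocation d p) c

def pathFrom (c : Int × Int) : List String → List (Int × Int)
  | [] => []
  | m :: t => seg (dirOf m) c (rangeOf m) ++ pathFrom (walkEnd (dirOf m) c (rangeOf m)) t

-- A's running-minimum update (cl = the list membership is tested against)
def upd (cl : List (Int × Int)) (s : Int) (p : Int × Int) : Int :=
  if cl.contains p then
    (if manhattanDistance p (0, 0) < s ∨ s = -1 then manhattanDistance p (0, 0) else s)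
  else s

def dists (cl : List (Int × Int)) (ps : List (Int × Int)) : List Int :=
  (ps.filter (fun p => cl.contains p)).map (fun p => manhattanDistance p (0, 0))

-- "best of a list of distances": -1 on empty, else its minimum
def bestOf : List Int → Int
  | [] => -1
  | d :: t => t.foldl min d

-- B's recursive segment builder (equal to wireSegments' fold)
def segsFrom (c : Int × Int) : List String → List (Int × Int × Int × Int × Int)
  | [] => []
  | m :: t =>
    if 0 < repsOf m then
      let δ := deltaOf (dirOf m)
      (c.1, c.2, δ.1, δ.2, repsOf m) ::
        segsFrom (c.1 + δ.1 * repsOf m, c.2 + δ.2 * repsOf m) t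
    else segsFrom c t

theorem segsFrom_cons (c : Int × Int) (m : String) (t : List String) :
    segsFrom c (m :: t) =
      if 0 < repsOf m then
        (c.1, c.2, (deltaOf (dirOf m)).1, (deltaOf (dirOf m)).2, repsOf m) ::
          segsFrom (c.1 + (deltaOf (dirOf m)).1 * repsOf m,
            c.2 + (deltaOf (dirOf m)).2 * repsOf m) t
      else segsFrom c t := rfl

theorem stepA_eq (fl : List (Int × Int)) (d : Char) (st : (Int × Int) × Int) (x : Int) :
    stepA fl d st x = (nextLocation d st.1, upd fl st.2 (nextLocation d st.1)) := by
  simp only [stepA, upd]; split_ifs <;> rfl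

theorem innerA (fl : List (Int × Int)) (d : Char) :
    ∀ (l : List Int) (c : Int × Int) (s : Int),
      l.foldl (stepA fl d) (c, s) = (walkEnd d c l, (seg d c l).foldl (upd fl) s) := by
  intro l
  induction l with
  | nil => intro c s; simp [walkEnd, seg]
  | cons x t ih =>
    intro c s
    rw [List.foldl_cons, stepA_eq, ih]
    simp [walkEnd, seg]

theorem outerA (fl : List (Int × Int)) :
    ∀ (ms : List String) (c : Int × Int) (s : Int),
      (ms.foldl (outerStepA fl) (c, s)).2 = (pathFrom c ms).foldl (upd fl) s := by
  intro ms
  induction ms with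
  | nil => intro c s; simp [pathFrom]
  | cons m t ih =>
    intro c s
    rw [List.foldl_cons]
    show (List.foldl (outerStepA fl) ((rangeOf m).foldl (stepA fl (dirOf m)) (c, s)) t).2 = _
    rw [innerA, ih]
    simp [pathFrom, List.foldl_append]

theorem manh_nonneg (p : Int × Int) : 0 ≤ manhattanDistance p (0, 0) := by
  unfold manhattanDistance
  exact add_nonneg (abs_nonneg _) (abs_nonneg _)

theorem manh_zero (p : Int × Int) : manhattanDistance p (0, 0) = |p.1| + |p.2| := by
  simp [manhattanDistance]

theorem minFold_pos (cl : List (Int × Int)) :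
    ∀ (ps : List (Int × Int)) (s : Int), 0 ≤ s →
      ps.foldl (upd cl) s = (dists cl ps).foldl min s := by
  intro ps
  induction ps with
  | nil => intro s _; simp [dists]
  | cons p t ih =>
    intro s hs
    by_cases hm : p ∈ cl
    · have hd := manh_nonneg p
      have h1 : upd cl s p = min s (manhattanDistance p (0, 0)) := by
        simp only [upd, List.contains_eq_mem, hm, decide_true, if_true]
        split_ifs with hc <;> omega
      rw [List.foldl_cons, h1, ih _ (le_min hs hd)]
      simp [dists, hm]
    · have h1 : upd cl s p = s := by simp [upd, hm]
      rw [List.foldl_cons, h1, ih _ hs]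
      simp [dists, hm]

theorem minFold_start (cl : List (Int × Int)) :
    ∀ ps : List (Int × Int), ps.foldl (upd cl) (-1) = bestOf (dists cl ps) := by
  intro ps
  induction ps with
  | nil => simp [dists, bestOf]
  | cons p t ih =>
    by_cases hm : p ∈ cl
    · have hd := manh_nonneg p
      have h1 : upd cl (-1) p = manhattanDistance p (0, 0) := by simp [upd, hm]
      rw [List.foldl_cons, h1, minFold_pos cl t _ hd,
        show dists cl (p :: t) = manhattanDistance p (0, 0) :: dists cl t by simp [dists, hm]]
      rfl
    · have h1 : upd cl (-1) p = -1 := by simp [upd, hm]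
      rw [List.foldl_cons, h1, ih,
        show dists cl (p :: t) = dists cl t by simp [dists, hm]]

-- bestOf depends only on the set of elements (all nonnegative in our use, but not needed)
theorem bestOf_congr (l1 l2 : List Int) (h : ∀ x, x ∈ l1 ↔ x ∈ l2) :
    bestOf l1 = bestOf l2 := by
  cases l1 with
  | nil =>
    cases l2 with
    | nil => rfl
    | cons e u => exact absurd ((h e).2 List.mem_cons_self) (List.not_mem_nil)
  | cons d t =>
    cases l2 with
    | nil => exact absurd ((h d).1 List.mem_cons_self) (List.not_mem_nil)
    | cons e u =>
      have m1 : (d :: t).min? = some (bestOf (d :: t)) := rfl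
      have m2 : (e :: u).min? = some (bestOf (e :: u)) := rfl
      rw [List.min?_eq_some_iff] at m1 m2
      exact le_antisymm (m1.2 _ ((h _).2 m2.1)) (m2.2 _ ((h _).1 m1.1))

-- geometry: marching with a unit delta
def validDelta (δ : Int × Int) : Prop :=
  δ = (0, 1) ∨ δ = (-1, 0) ∨ δ = (0, -1) ∨ δ = (1, 0)

theorem nextLocation_valid (d : Char) (hd : d ∈ ['R', 'D', 'L', 'U']) (c : Int × Int) :
    nextLocation d c = (c.1 + (deltaOf d).1, c.2 + (deltaOf d).2) := by
  fin_cases hd <;> simp [nextLocation, deltaOf] <;> omega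

theorem deltaOf_valid (d : Char) (hd : d ∈ ['R', 'D', 'L', 'U']) : validDelta (deltaOf d) := by
  fin_cases hd <;> simp [deltaOf, validDelta]

theorem walkEnd_valid (d : Char) (hd : d ∈ ['R', 'D', 'L', 'U']) :
    ∀ (l : List Int) (c : Int × Int),
      walkEnd d c l = (c.1 + (deltaOf d).1 * l.length, c.2 + (deltaOf d).2 * l.length) := by
  intro l
  induction l with
  | nil => intro c; simp [walkEnd]
  | cons x t ih =>
    intro c
    show walkEnd d (nextLocation d c) t = _
    rw [ih, nextLocation_valid d hd]
    simp only [List.length_cons, Prod.mk.injEq]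
    refine ⟨by push_cast; ring, by push_cast; ring⟩

theorem mem_seg_valid (d : Char) (hd : d ∈ ['R', 'D', 'L', 'U']) :
    ∀ (l : List Int) (c : Int × Int) (p : Int × Int),
      (p ∈ seg d c l ↔
        onSegment p (c.1, c.2, (deltaOf d).1, (deltaOf d).2, (l.length : Int)) = true) := by
  intro l
  induction l with
  | nil =>
    intro c p
    have hv := deltaOf_valid d hd
    simp only [seg, List.not_mem_nil, false_iff]
    rcases hv with h | h | h | h <;> rw [h] <;> simp [onSegment] <;> omega
  | cons x t ih =>
    intro c p
    have hv := deltaOf_valid d hd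
    rw [show seg d c (x :: t) = nextLocation d c :: seg d (nextLocation d c) t from rfl,
      List.mem_cons, ih, nextLocation_valid d hd, Prod.ext_iff]
    rcases hv with h | h | h | h <;> rw [h] <;>
      simp only [onSegment, List.length_cons] <;> simp <;> constructor <;> intro hh <;> omega

-- wireSegments' fold equals the recursive builder
theorem wireSegments_eq :
    ∀ (ms : List String) (c : Int × Int) (acc : List (Int × Int × Int × Int × Int)),
      (ms.foldl (fun st move =>
        let reps := (PySem.Int.ofChars? (move.toList.drop 1)).getD 0
        if 0 < reps then
          let δ := deltaOf (move.toList.headD ' ')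
          ((st.1.1 + δ.1 * reps, st.1.2 + δ.2 * reps),
            st.2 ++ [(st.1.1, st.1.2, δ.1, δ.2, reps)])
        else st) (c, acc)).2 = acc ++ segsFrom c ms := by
  intro ms
  induction ms with
  | nil => intro c acc; simp [segsFrom]
  | cons m t ih =>
    intro c acc
    rw [List.foldl_cons]
    show (List.foldl _
        (if 0 < repsOf m then
          ((c.1 + (deltaOf (dirOf m)).1 * repsOf m, c.2 + (deltaOf (dirOf m)).2 * repsOf m),
            acc ++ [(c.1, c.2, (deltaOf (dirOf m)).1, (deltaOf (dirOf m)).2, repsOf m)])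
        else (c, acc)) t).2 = acc ++ segsFrom c (m :: t)
    rw [segsFrom_cons]
    by_cases h : 0 < repsOf m
    · rw [if_pos h, if_pos h, ih]
      simp
    · rw [if_neg h, if_neg h, ih]

-- under Pre_, trajectory membership = segment containment
theorem path_iff_segs (sm : List String)
    (hpre : ∀ move ∈ sm, move.toList ≠ [] ∧
      (PySem.Int.ofChars? (move.toList.drop 1)).isSome = true ∧
      (repsOf move ≤ 0 ∨ dirOf move ∈ ['R', 'D', 'L', 'U'])) :
    ∀ (c : Int × Int) (p : Int × Int),
      (p ∈ pathFrom c sm ↔ (segsFrom c sm).any (fun s => onSegment p s) = true) := by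
  induction sm with
  | nil => intro c p; simp [pathFrom, segsFrom]
  | cons m t ih =>
    intro c p
    have hm := hpre m List.mem_cons_self
    have ht : ∀ move ∈ t, _ := fun move hmem => hpre move (List.mem_cons_of_mem m hmem)
    by_cases hr : 0 < repsOf m
    · have hd : dirOf m ∈ ['R', 'D', 'L', 'U'] := by
        rcases hm.2.2 with h | h
        · omega
        · exact h
      have hlen : ((rangeOf m).length : Int) = repsOf m := by
        simp only [rangeOf, PySem.List.length_pyRange_one]
        omega
      rw [show pathFrom c (m :: t)
            = seg (dirOf m) c (rangeOf m) ++ pathFrom (walkEnd (dirOf m) c (rangeOf m)) t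
          from rfl,
        List.mem_append, mem_seg_valid (dirOf m) hd, hlen,
        walkEnd_valid (dirOf m) hd, hlen,
        segsFrom_cons, if_pos hr,
        List.any_cons, ih ht]
      simp [Bool.or_eq_true]
    · have hrange : rangeOf m = [] := PySem.List.pyRange_one_eq_nil (by omega)
      rw [show pathFrom c (m :: t)
            = seg (dirOf m) c (rangeOf m) ++ pathFrom (walkEnd (dirOf m) c (rangeOf m)) t
          from rfl,
        segsFrom_cons, if_neg hr, hrange]
      simpa [seg, walkEnd] using ih ht c p

-- ===== VERDICT (by name: the statement is the Claim_ definition above) =====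
theorem closest_intersection_spec : Claim_equal_closest_intersection := by
  intro fl sm _ hpre
  show closest_intersection fl sm = closest_intersection_alt fl sm
  have hpre' : ∀ move ∈ sm, move.toList ≠ [] ∧
      (PySem.Int.ofChars? (move.toList.drop 1)).isSome = true ∧
      (repsOf move ≤ 0 ∨ dirOf move ∈ ['R', 'D', 'L', 'U']) := hpre
  -- A's side: running-minimum walk = bestOf over the trajectory's intersection distances
  have hA : closest_intersection fl sm = bestOf (dists fl (pathFrom (0, 0) sm)) := by
    have h0 : closest_intersection fl sm
        = (sm.foldl (outerStepA fl) ((((0 : Int), (0 : Int)), (-1 : Int)))).2 := rfl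
    rw [h0, outerA, minFold_start]
  -- B's side: its segments are segsFrom (0,0) sm
  have hSegs : wireSegments sm = segsFrom ((0 : Int), (0 : Int)) sm := by
    have := wireSegments_eq sm ((0 : Int), (0 : Int)) []
    simpa [wireSegments] using this
  -- B's fold over first_locations is the upd-fold against the trajectory
  have hB : closest_intersection_alt fl sm
      = bestOf (dists (pathFrom (0, 0) sm) fl) := by
    have hbody : (fun (best : Int) (p : Int × Int) =>
        if (wireSegments sm).any (fun s => onSegment p s) then
          let distance := |p.1| + |p.2|
          if distance < best ∨ best = -1 then distance else best
        else best) = upd (pathFrom ((0 : Int), (0 : Int)) sm) := by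
      funext best p
      have hmem := path_iff_segs sm hpre' ((0 : Int), (0 : Int)) p
      rw [hSegs]
      by_cases hp : p ∈ pathFrom ((0 : Int), (0 : Int)) sm
      · rw [if_pos (hmem.1 hp)]
        simp [upd, hp, manh_zero]
      · rw [if_neg (fun h => hp (hmem.2 h))]
        simp [upd, hp]
    show fl.foldl (fun best p =>
        if (wireSegments sm).any (fun s => onSegment p s) then
          let distance := |p.1| + |p.2|
          if distance < best ∨ best = -1 then distance else best
        else best) (-1) = _
    rw [hbody, minFold_start]
  rw [hA, hB]
  apply bestOf_congr
  intro x
  simp only [dists, List.mem_map, List.mem_filter, List.contains_eq_mem, decide_eq_true_eq]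
  constructor
  · rintro ⟨p, ⟨h1, h2⟩, h3⟩; exact ⟨p, ⟨h2, h1⟩, h3⟩
  · rintro ⟨p, ⟨h1, h2⟩, h3⟩; exact ⟨p, ⟨h2, h1⟩, h3⟩
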